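-- pv_equiv track=rewrite | github.com/Nobody0321/MyCodes | OJ/笔试/顺丰_20190910第2题特殊计时.py | convert
-- ===== SOURCE A (Python) =====
-- def convert(num, d):
--     """
--     d进制转10进制
--     """
--     c = 1
--     ret = 0
--     while num:
--        ret += (num % 10) * c
--        c *= d
--        num //= 10
--     return ret
-- ===== SOURCE B (Python) =====
-- def convert(num, d):
--     """
--     d进制转10进制 — two stages: extract the decimal digits into a list,
--     then fold them most-significant-first with Horner's rule.
--     """
--     digits = []
--     while num:
--         digits.append(num % 10)
--         num //= 10
--     value = 0
--     for g in reversed(digits):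
--         value = value * d + g
--     return value
-- ===== Notes on version B (the rewrite author's own statement) =====
-- stated objective: alternative
-- what changed: Replaced A's single accumulator loop carrying a running power (c *= d) by two stages: first extract the decimal digits into a list, then fold the reversed list with Horner's rule (value = value*d + digit), so no power accumulator exists.
import Mathlib
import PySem

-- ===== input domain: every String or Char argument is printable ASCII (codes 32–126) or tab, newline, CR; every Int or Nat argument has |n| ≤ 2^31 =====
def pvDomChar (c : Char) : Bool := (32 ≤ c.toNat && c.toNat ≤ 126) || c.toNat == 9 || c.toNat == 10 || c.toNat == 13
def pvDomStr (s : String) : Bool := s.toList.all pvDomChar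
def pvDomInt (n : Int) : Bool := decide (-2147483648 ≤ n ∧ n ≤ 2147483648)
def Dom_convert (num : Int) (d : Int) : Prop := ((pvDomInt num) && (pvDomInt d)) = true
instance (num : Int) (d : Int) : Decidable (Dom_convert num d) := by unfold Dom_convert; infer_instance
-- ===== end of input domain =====

-- B replaces A's accumulator loop (running power c *= d) by two stages — digit extraction into a list, then a Horner fold over the reversed list; objective: alternative.


-- ===== PORT A =====
-- the while loop with state (ret, c); guard '0 < num' instead of 'num ≠ 0' only makes the loop
-- total (Python's loop never terminates for num < 0, so the value there is unconstrained)
def convertGo (num : Int) (c : Int) (ret : Int) (d : Int) : Int :=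
  if h : 0 < num then
    convertGo (PySem.Int.floordiv num 10) (c * d) (ret + PySem.Int.mod num 10 * c) d
  else ret
termination_by num.toNat
decreasing_by
  have : PySem.Int.floordiv num 10 = num / 10 := PySem.Int.floordiv_eq_ediv_of_pos (by omega)
  rw [this]; omega

def convert (num : Int) (d : Int) : Int := convertGo num 1 0 d

-- ===== PORT B =====
-- stage 1 of Source B: the digit-extraction loop, least-significant first
-- (guard '0 < num' makes it total; Python B likewise never terminates for num < 0)
def extractDigits (num : Int) : List Int :=
  if h : 0 < num then
    PySem.Int.mod num 10 :: extractDigits (PySem.Int.floordiv num 10)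
  else []
termination_by num.toNat
decreasing_by
  have : PySem.Int.floordiv num 10 = num / 10 := PySem.Int.floordiv_eq_ediv_of_pos (by omega)
  rw [this]; omega

-- stage 2 of Source B: 'for g in reversed(digits): value = value * d + g'
def convert_alt (num : Int) (d : Int) : Int :=
  (extractDigits num).reverse.foldl (fun value g => value * d + g) 0

-- ===== PRECONDITION & SPEC =====
def Spec_convert (num : Int) (d : Int) (out : Int) : Prop := out = convert_alt num d
instance (num : Int) (d : Int) (out : Int) : Decidable (Spec_convert num d out) := by unfold Spec_convert; infer_instance

-- ===== CLAIM (what is proved, stated in full; the proofs are below) =====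
def Claim_equal_convert : Prop := ∀ (num : Int) (d : Int), Dom_convert num d → Spec_convert num d (convert num d)

-- ===== LEMMAS AND PROOFS =====
-- Horner recurrence satisfied by B: peeling the least-significant digit
theorem convert_alt_rec (num d : Int) (h : 0 < num) :
    convert_alt num d =
      convert_alt (PySem.Int.floordiv num 10) d * d + PySem.Int.mod num 10 := by
  unfold convert_alt
  rw [extractDigits, dif_pos h]
  simp [List.foldl_append]

-- loop invariant: A's accumulator loop computes ret + (B's value) * c
theorem convertGo_eq (num c ret d : Int) :
    convertGo num c ret d = ret + convert_alt num d * c := by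
  by_cases h : 0 < num
  · have ih := convertGo_eq (PySem.Int.floordiv num 10) (c * d) (ret + PySem.Int.mod num 10 * c) d
    rw [convertGo, dif_pos h, ih, convert_alt_rec num d h]
    ring
  · rw [convertGo, dif_neg h]
    unfold convert_alt
    rw [extractDigits, dif_neg h]
    simp
termination_by num.toNat
decreasing_by
  have : PySem.Int.floordiv num 10 = num / 10 := PySem.Int.floordiv_eq_ediv_of_pos (by omega)
  rw [this]; omega

-- ===== VERDICT (by name: the statement is the Claim_ definition above) =====
theorem convert_spec : Claim_equal_convert := by
  intro num d _
  show convert num d = convert_alt num d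
  rw [convert, convertGo_eq]
  ring
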